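-- pv_equiv track=rewrite | github.com/darsovit/AdventOfCode2018 | Day12/Day12.5.py | convertPots
-- ===== SOURCE A (Python) =====
-- def convertPots( rule ):
--     value = 0
--     bitCount = 0
--     for i in list(rule):
--         if i == '#':
--             value = (1<<bitCount) + value
--         bitCount += 1
--
--     return value
-- ===== SOURCE B (Python) =====
-- def convertPots(rule):
--     # Horner accumulation over the reversed pattern (index 0 least significant)
--     value = 0
--     for c in reversed(rule):
--         value = value * 2 + (1 if c == '#' else 0)
--     return value
-- ===== Notes on version B (the rewrite author's own statement) =====
-- stated objective: idiomatic
-- what changed: Replaces per-position bit shifting (value += 1<<bitCount) with Horner accumulation over the reversed string (value = value*2 + bit), dropping the bitCount counter.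
import Mathlib
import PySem

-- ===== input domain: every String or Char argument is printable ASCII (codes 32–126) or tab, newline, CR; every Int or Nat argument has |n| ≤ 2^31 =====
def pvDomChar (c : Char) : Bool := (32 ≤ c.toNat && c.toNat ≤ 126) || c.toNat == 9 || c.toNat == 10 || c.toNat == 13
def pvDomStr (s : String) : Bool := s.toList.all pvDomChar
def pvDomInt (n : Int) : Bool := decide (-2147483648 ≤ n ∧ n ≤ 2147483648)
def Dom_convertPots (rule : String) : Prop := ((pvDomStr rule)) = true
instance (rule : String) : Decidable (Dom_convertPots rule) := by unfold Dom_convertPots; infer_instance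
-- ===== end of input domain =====

-- B replaces per-position bit shifting with Horner accumulation over the reversed string (idiomatic decomposition).


-- ===== PORT A =====
-- value = 0; bitCount = 0; for i in rule: if i=='#': value = (1<<bitCount)+value; bitCount += 1
def convertPots (rule : String) : Int :=
  (rule.toList.foldl
    (fun (st : Int × Nat) i =>
      (if i = '#' then (2 : Int) ^ st.2 + st.1 else st.1, st.2 + 1))
    (0, 0)).1

-- ===== PORT B =====
-- value = 0; for c in reversed(rule): value = value*2 + (1 if c=='#' else 0)
def convertPots_alt (rule : String) : Int :=
  rule.toList.reverse.foldl
    (fun (value : Int) c => value * 2 + (if c = '#' then 1 else 0)) 0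

-- ===== PRECONDITION & SPEC =====
def Spec_convertPots (rule : String) (out : Int) : Prop := out = convertPots_alt rule
instance (rule : String) (out : Int) : Decidable (Spec_convertPots rule out) := by unfold Spec_convertPots; infer_instance

-- ===== CLAIM (what is proved, stated in full; the proofs are below) =====
def Claim_equal_convertPots : Prop := ∀ (rule : String), Dom_convertPots rule → Spec_convertPots rule (convertPots rule)

-- ===== LEMMAS AND PROOFS =====

def pvHorner (l : List Char) : Int :=
  l.foldr (fun c acc => acc * 2 + (if c = '#' then 1 else 0)) 0

theorem pvA_fold (l : List Char) : ∀ (v : Int) (b : Nat),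
    (l.foldl
      (fun (st : Int × Nat) i =>
        (if i = '#' then (2 : Int) ^ st.2 + st.1 else st.1, st.2 + 1))
      (v, b)).1 = v + (2 : Int) ^ b * pvHorner l := by
  induction l with
  | nil => intro v b; simp [pvHorner]
  | cons c t ih =>
    intro v b
    simp only [List.foldl_cons, pvHorner, List.foldr_cons]
    rw [ih]
    by_cases h : c = '#' <;> simp [h, pow_succ, pvHorner] <;> ring

theorem pvB_eq (rule : String) : convertPots_alt rule = pvHorner rule.toList := by
  unfold convertPots_alt pvHorner
  rw [List.foldl_reverse]

-- ===== VERDICT (by name: the statement is the Claim_ definition above) =====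
theorem convertPots_spec : Claim_equal_convertPots := by
  intro rule _
  show convertPots rule = convertPots_alt rule
  rw [pvB_eq, convertPots, pvA_fold]
  simp
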